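-- pv_equiv track=rewrite | github.com/ddmms/ml-peg | ml_peg/app/build_app.py | _category_to_path
-- ===== SOURCE A (Python) =====
-- def _category_to_path(category_name: str) -> str:
--     """
--     Convert a category name to a stable URL path.
--
--     Parameters
--     ----------
--     category_name
--         Name of category to convert.
--
--     Returns
--     -------
--     str
--         URL path corresponding to category.
--     """
--     slug = "".join(
--         character.lower() if character.isalnum() else "-" for character in category_name
--     )
--     slug = "-".join(part for part in slug.split("-") if part)
--     if not slug:
--         raise ValueError(f"Unable to construct path for {category_name}")
--     return f"/category/{slug}"
-- ===== SOURCE B (Python) =====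
-- def _category_to_path(category_name: str) -> str:
--     """One-pass slug builder: collapses separators inline instead of split/filter/join."""
--     out = []
--     for character in category_name:
--         if character.isalnum():
--             out.append(character.lower())
--         elif out and out[-1] != "-":
--             out.append("-")
--     if out and out[-1] == "-":
--         out.pop()
--     slug = "".join(out)
--     if not slug:
--         raise ValueError(f"Unable to construct path for {category_name}")
--     return f"/category/{slug}"
-- ===== Notes on version B (the rewrite author's own statement) =====
-- stated objective: simpler
-- what changed: Replaces A's two-pass pipeline (map every char, then split on '-', filter empties and re-join) by a single-pass state machine that emits lowered alphanumerics and collapses separator runs inline, stripping at most one trailing dash.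
import Mathlib
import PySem

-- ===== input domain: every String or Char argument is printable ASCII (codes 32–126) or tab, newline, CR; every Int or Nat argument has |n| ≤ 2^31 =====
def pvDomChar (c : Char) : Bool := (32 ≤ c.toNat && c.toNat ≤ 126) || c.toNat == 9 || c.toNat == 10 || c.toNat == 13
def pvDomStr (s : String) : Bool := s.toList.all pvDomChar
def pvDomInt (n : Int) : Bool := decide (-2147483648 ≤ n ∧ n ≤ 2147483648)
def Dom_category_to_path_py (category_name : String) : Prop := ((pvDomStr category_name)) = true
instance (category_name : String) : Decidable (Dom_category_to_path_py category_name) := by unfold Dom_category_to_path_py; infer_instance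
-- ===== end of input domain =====

-- B replaces A's two-pass map-then-split/filter/join slug construction by a single-pass
-- state machine that collapses separator runs inline (objective: simpler one-pass decomposition).


-- ===== PORT A =====
-- character.lower() if character.isalnum() else "-"   (one character of the generator)
def pvSlugChar (c : Char) : List Char :=
  if PySem.Chars.isalnum c then [PySem.Chars.lowerChar c] else ['-']

def category_to_path_py (category_name : String) : String :=
  -- slug = "".join(... for character in category_name)
  let slug := PySem.Chars.join [] (category_name.toList.map pvSlugChar)
  -- slug = "-".join(part for part in slug.split("-") if part)
  let slug := PySem.Chars.join ['-'] ((PySem.Chars.splitOn slug ['-']).filter (fun p => p ≠ []))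
  -- if not slug: raise ValueError(...)  -- excluded by Pre_; "" stands in for the raise
  if slug = [] then "" else "/category/" ++ String.ofList slug

-- ===== PORT B =====
-- loop body: append lowered alnum chars; append '-' only after a non-empty, non-dash end
def pvStep (out : List Char) (c : Char) : List Char :=
  if PySem.Chars.isalnum c then out ++ [PySem.Chars.lowerChar c]
  else if out ≠ [] ∧ out.getLast? ≠ some '-' then out ++ ['-'] else out

def category_to_path_py_alt (category_name : String) : String :=
  let out := category_name.toList.foldl pvStep []
  -- if out and out[-1] == "-": out.pop()
  let out := if out ≠ [] ∧ out.getLast? = some '-' then out.dropLast else out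
  -- if not slug: raise ValueError(...)  -- excluded by Pre_; "" stands in for the raise
  if out = [] then "" else "/category/" ++ String.ofList out

-- ===== PRECONDITION & SPEC =====
-- Pre_ excludes exactly the inputs with no alphanumeric character, on which the Python
-- (both A and B) raises ValueError instead of returning.
def Pre_category_to_path_py (category_name : String) : Prop :=
  category_name.toList.any PySem.Chars.isalnum = true
instance (category_name : String) : Decidable (Pre_category_to_path_py category_name) := by
  unfold Pre_category_to_path_py; infer_instance

def pvWitness_category_to_path_py : String := "Machine Learning"

def Spec_category_to_path_py (category_name : String) (out : String) : Prop := out = category_to_path_py_alt category_name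
instance (category_name : String) (out : String) : Decidable (Spec_category_to_path_py category_name out) := by unfold Spec_category_to_path_py; infer_instance

-- ===== CLAIM (what is proved, stated in full; the proofs are below) =====
def Claim_equal_category_to_path_py : Prop := ∀ (category_name : String), Dom_category_to_path_py category_name → Pre_category_to_path_py category_name → Spec_category_to_path_py category_name (category_to_path_py category_name)

-- ===== LEMMAS AND PROOFS =====

-- f applied character-wise by A's first pass
def pvMapChar (c : Char) : Char :=
  if PySem.Chars.isalnum c then PySem.Chars.lowerChar c else '-'

-- plain structural version of splitOn.go for the single-char separator '-'
def pvSplit (cur : List Char) : List Char → List (List Char)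
  | [] => [cur.reverse]
  | c :: rest => if c = '-' then cur.reverse :: pvSplit [] rest else pvSplit (c :: cur) rest

-- B's observable accumulator as a function of A's (parts so far, current run)
def pvGlue (ps : List (List Char)) (r : List Char) : List Char :=
  if r = [] then PySem.Chars.join ['-'] ps ++ (if ps = [] then [] else ['-'])
  else PySem.Chars.join ['-'] (ps ++ [r])

def pvFin (b : List Char) : List Char :=
  if b ≠ [] ∧ b.getLast? = some '-' then b.dropLast else b

theorem pv_join_nil (xs : List (List Char)) : PySem.Chars.join [] xs = xs.flatten := by
  induction xs with
  | nil => simp [PySem.Chars.join, List.intercalate]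
  | cons h t ih =>
    cases t with
    | nil => simp [PySem.Chars.join, List.intercalate]
    | cons h' t' =>
      simp only [PySem.Chars.join, List.intercalate] at *
      simp [List.intersperse] at *
      simpa using ih

theorem pv_firstjoin (cs : List Char) :
    PySem.Chars.join [] (cs.map pvSlugChar) = cs.map pvMapChar := by
  rw [pv_join_nil]
  induction cs with
  | nil => rfl
  | cons c cs ih =>
    simp only [List.map_cons, List.flatten_cons, ih, pvSlugChar, pvMapChar]
    split <;> simp

theorem pv_toNat_ofNat (n : Nat) (h : n < 55296) : (Char.ofNat n).toNat = n := by
  unfold Char.ofNat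
  split
  · simp [Char.toNat, Char.ofNatAux]
  · rename_i hv; exact absurd (Or.inl h) hv

theorem pv_lower_ne_dash (c : Char) (h : PySem.Chars.isalnum c = true) :
    PySem.Chars.lowerChar c ≠ '-' := by
  simp only [PySem.Chars.isalnum, PySem.Chars.isalpha, PySem.Chars.isupper,
    PySem.Chars.islower, PySem.Chars.isdigit, Bool.or_eq_true, Bool.and_eq_true,
    decide_eq_true_eq] at h
  simp only [PySem.Chars.lowerChar, PySem.Chars.isupper, Bool.and_eq_true, decide_eq_true_eq]
  split_ifs with hu
  · intro hEq
    have h2 : (Char.ofNat (c.toNat + 32)).toNat = 45 := by rw [hEq]; rfl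
    obtain ⟨h3, h4⟩ := hu
    have h3' : 65 ≤ c.toNat := by simpa [Char.le_def] using h3
    have h4' : c.toNat ≤ 90 := by simpa [Char.le_def] using h4
    rw [pv_toNat_ofNat _ (by omega)] at h2
    omega
  · intro hEq
    subst hEq
    simp at h hu

-- splitOn with separator "-" is pvSplit
theorem pv_go_eq (l : List Char) : ∀ (fuel : Nat) (cur : List Char) (acc : List (List Char)),
    l.length ≤ fuel →
    PySem.Chars.splitOn.go ['-'] fuel l cur acc = acc.reverse ++ pvSplit cur l := by
  induction l with
  | nil =>
    intro fuel cur acc h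
    cases fuel <;> simp [PySem.Chars.splitOn.go, pvSplit]
  | cons c rest ih =>
    intro fuel cur acc h
    cases fuel with
    | zero => exact absurd h (by simp)
    | succ fuel =>
      simp only [PySem.Chars.splitOn.go, pvSplit]
      by_cases hc : c = '-'
      · subst hc
        simp [List.isPrefixOf, ih fuel [] (cur.reverse :: acc) (by simpa using Nat.lt_succ_iff.mp h)]
      · have hp : List.isPrefixOf ['-'] (c :: rest) = false := by
          simp [List.isPrefixOf]
          exact fun hx => (hc hx.symm).elim
        simp [hp, ih fuel (c :: cur) acc (by simpa using Nat.lt_succ_iff.mp h), hc]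

theorem pv_splitOn_eq (l : List Char) :
    PySem.Chars.splitOn l ['-'] = pvSplit [] l := by
  simpa using pv_go_eq l (l.length + 1) [] [] (by omega)

theorem pv_inter_snoc (ps : List (List Char)) (q : List Char) :
    PySem.Chars.join ['-'] (ps ++ [q]) =
      (if ps = [] then [] else PySem.Chars.join ['-'] ps ++ ['-']) ++ q := by
  induction ps with
  | nil => simp [PySem.Chars.join, List.intercalate]
  | cons p ps ih =>
    cases ps with
    | nil => simp [PySem.Chars.join, List.intercalate]
    | cons p' ps' =>
      simp only [PySem.Chars.join, List.intercalate] at *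
      simp [List.intersperse] at *
      simp [ih]

theorem pv_glue_snoc (ps : List (List Char)) (r : List Char) (lc : Char) :
    pvGlue ps (r ++ [lc]) = pvGlue ps r ++ [lc] := by
  unfold pvGlue
  by_cases hr : r = []
  · subst hr
    simp only [List.nil_append, pv_inter_snoc]
    by_cases hp : ps = [] <;> simp [hp, PySem.Chars.join, List.intercalate]
  · simp [hr, pv_inter_snoc]

theorem pv_getLast?_ne_dash (r : List Char) (h : ∀ x ∈ r, x ≠ '-') :
    r.getLast? ≠ some '-' := by
  cases hg : r.getLast? with
  | none => simp
  | some a =>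
    have : a ∈ r := List.mem_of_getLast? hg
    simp [h a this]

theorem pv_glue_nil_ne (ps : List (List Char)) (hp : ps ≠ []) :
    pvGlue ps [] = PySem.Chars.join ['-'] ps ++ ['-'] := by simp [pvGlue, hp]

theorem pv_glue_nil_nil : pvGlue [] [] = [] := by
  simp [pvGlue, PySem.Chars.join, List.intercalate]

theorem pv_fin_glue_nil (ps : List (List Char)) :
    pvFin (pvGlue ps []) = PySem.Chars.join ['-'] ps := by
  by_cases hp : ps = []
  · subst hp
    simp [pvFin, pv_glue_nil_nil, PySem.Chars.join, List.intercalate]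
  · rw [pv_glue_nil_ne ps hp]
    unfold pvFin
    rw [if_pos ⟨by simp, by rw [List.getLast?_append_of_ne_nil _ (by simp)]; simp⟩]
    simp

theorem pv_glue_pos (ps : List (List Char)) (r : List Char) (hr : r ≠ []) :
    pvGlue ps r = PySem.Chars.join ['-'] (ps ++ [r]) := by simp [pvGlue, hr]

theorem pv_core (cs : List Char) : ∀ (ps : List (List Char)) (r : List Char),
    (∀ p ∈ ps, p ≠ []) → (∀ p ∈ ps, ∀ x ∈ p, x ≠ '-') → (∀ x ∈ r, x ≠ '-') →
    pvFin (cs.foldl pvStep (pvGlue ps r)) =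
      PySem.Chars.join ['-'] (ps ++ (pvSplit r.reverse (cs.map pvMapChar)).filter (fun p => p ≠ [])) := by
  induction cs with
  | nil =>
    intro ps r hne hd hr
    simp only [List.foldl_nil, List.map_nil]
    by_cases h : r = []
    · subst h
      simpa [pvSplit] using pv_fin_glue_nil ps
    · have hs : pvSplit r.reverse [] = [r] := by simp [pvSplit]
      rw [hs]
      have hglue := pv_glue_pos ps r h
      have hlast : (pvGlue ps r).getLast? ≠ some '-' := by
        rw [hglue, pv_inter_snoc, List.getLast?_append_of_ne_nil _ h]
        exact pv_getLast?_ne_dash r hr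
      unfold pvFin
      rw [if_neg (by rintro ⟨_, hx⟩; exact hlast hx), hglue]
      congr 1
      simp [h]
  | cons c cs ih =>
    intro ps r hne hd hr
    simp only [List.foldl_cons, List.map_cons]
    by_cases h : PySem.Chars.isalnum c = true
    · have hlc := pv_lower_ne_dash c h
      have hstep : pvStep (pvGlue ps r) c = pvGlue ps (r ++ [PySem.Chars.lowerChar c]) := by
        rw [pv_glue_snoc]; simp [pvStep, h]
      rw [hstep, ih ps (r ++ [PySem.Chars.lowerChar c]) hne hd
        (by intro x hx
            rcases List.mem_append.mp hx with h1 | h1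
            · exact hr x h1
            · have : x = PySem.Chars.lowerChar c := by simpa using h1
              exact this ▸ hlc)]
      simp [pvMapChar, h, pvSplit, hlc]
    · have hmc : pvMapChar c = '-' := by simp [pvMapChar, h]
      rw [hmc]
      have hsplit : pvSplit r.reverse ('-' :: cs.map pvMapChar) = r :: pvSplit [] (cs.map pvMapChar) := by
        simp [pvSplit]
      rw [hsplit]
      by_cases hrr : r = []
      · subst hrr
        have hstep : pvStep (pvGlue ps []) c = pvGlue ps [] := by
          unfold pvStep
          rw [if_neg (by simp [h])]
          by_cases hp : ps = []
          · subst hp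
            rw [if_neg]
            rintro ⟨h1, _⟩
            exact h1 pv_glue_nil_nil
          · rw [if_neg]
            rintro ⟨_, h2⟩
            exact h2 (by rw [pv_glue_nil_ne ps hp, List.getLast?_append_of_ne_nil _ (by simp)]; simp)
        rw [hstep, ih ps [] hne hd (by simp)]
        simp
      · have hglue := pv_glue_pos ps r hrr
        have hstep : pvStep (pvGlue ps r) c = pvGlue (ps ++ [r]) [] := by
          unfold pvStep
          rw [if_neg (by simp [h])]
          rw [if_pos ⟨by rw [hglue, pv_inter_snoc]; simp [hrr],
              by rw [hglue, pv_inter_snoc, List.getLast?_append_of_ne_nil _ hrr]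
                 exact pv_getLast?_ne_dash r hr⟩]
          rw [pv_glue_nil_ne _ (by simp), hglue]
        rw [hstep, ih (ps ++ [r]) []
          (by intro p hp
              rcases List.mem_append.mp hp with h1 | h1
              · exact hne p h1
              · have : p = r := by simpa using h1
                exact this ▸ hrr)
          (by intro p hp x hx
              rcases List.mem_append.mp hp with h1 | h1
              · exact hd p h1 x hx
              · have : p = r := by simpa using h1
                exact hr x (this ▸ hx))
          (by simp)]
        simp [hrr]

theorem category_to_path_py_spec : Claim_equal_category_to_path_py := by
  intro s _ hpre
  unfold Spec_category_to_path_py category_to_path_py category_to_path_py_alt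
  dsimp only
  have hA : PySem.Chars.join ['-']
        ((PySem.Chars.splitOn (PySem.Chars.join [] (s.toList.map pvSlugChar)) ['-']).filter (fun p => p ≠ [])) =
      pvFin (s.toList.foldl pvStep []) := by
    rw [pv_firstjoin, pv_splitOn_eq]
    have := pv_core s.toList [] [] (by simp) (by simp) (by simp)
    have hglue0 : pvGlue [] [] = [] := by simp [pvGlue, PySem.Chars.join, List.intercalate]
    rw [hglue0] at this
    rw [this]
    simp
  rw [hA]
  rfl
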